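-- pv_equiv track=rewrite | github.com/VincenzoNannetti/Continual-Learning-in-Deep-Learning-Based-Channel-Estimation | baseline_cl/scripts/plot_final_performance.py | create_domain_order
-- ===== SOURCE A (Python) =====
-- def create_domain_order(domains):
--     """Create a logical ordering for domains based on their names."""
--     # Define ordering by SNR level and speed
--     snr_order = ['high_snr', 'med_snr', 'low_snr']
--     speed_order = ['slow', 'med', 'fast']
--
--     ordered_domains = []
--
--     # Group by SNR first, then by speed
--     for snr in snr_order:
--         for speed in speed_order:
--             pattern = f"{snr}_{speed}_linear"
--             matching = [d for d in domains if pattern in d]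
--             ordered_domains.extend(sorted(matching))
--
--     # Add any remaining domains
--     remaining = [d for d in domains if d not in ordered_domains]
--     ordered_domains.extend(sorted(remaining))
--
--     return ordered_domains
-- ===== SOURCE B (Python) =====
-- def create_domain_order(domains):
--     """Create a logical ordering for domains based on their names."""
--     snr_order = ['high_snr', 'med_snr', 'low_snr']
--     speed_order = ['slow', 'med', 'fast']
--     patterns = [f"{snr}_{speed}_linear" for snr in snr_order for speed in speed_order]
--     # One pass over domains: drop each domain into the bucket of every pattern
--     # it contains (bucket 9 if it contains none), then flatten sorted buckets.
--     buckets = [[] for _ in range(10)]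
--     for d in domains:
--         ranks = [i for i, p in enumerate(patterns) if p in d]
--         for r in (ranks or [9]):
--             buckets[r].append(d)
--     return [d for b in buckets for d in sorted(b)]
-- ===== Notes on version B (the rewrite author's own statement) =====
-- stated objective: alternative
-- what changed: Replaces nine per-pattern scans over the domain list plus a 'd not in ordered_domains' membership pass with a single bucketing pass over domains (each domain is classified once into per-pattern buckets or a no-match bucket) followed by flattening the sorted buckets; it trades repeated whole-list scans for per-domain classification at similar overall cost.
import Mathlib
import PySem

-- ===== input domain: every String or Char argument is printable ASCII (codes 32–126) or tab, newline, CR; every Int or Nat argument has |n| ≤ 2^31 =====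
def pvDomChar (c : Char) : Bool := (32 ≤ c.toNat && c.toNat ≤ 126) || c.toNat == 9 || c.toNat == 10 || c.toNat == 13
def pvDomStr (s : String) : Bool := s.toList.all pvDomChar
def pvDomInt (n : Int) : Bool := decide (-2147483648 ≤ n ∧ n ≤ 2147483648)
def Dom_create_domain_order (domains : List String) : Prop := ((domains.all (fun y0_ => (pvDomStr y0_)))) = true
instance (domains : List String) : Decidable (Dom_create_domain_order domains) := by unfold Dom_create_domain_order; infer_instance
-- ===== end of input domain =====

-- B replaces A's nine per-pattern scans plus its 'not in ordered_domains' membership pass with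
-- one bucketing pass over the domains followed by flattening the sorted buckets (objective: alternative).


-- ===== PORT A =====
def create_domain_order (domains : List String) : List String :=
  let snr_order := ["high_snr", "med_snr", "low_snr"]
  let speed_order := ["slow", "med", "fast"]
  let ordered_domains : List String :=
    snr_order.foldl (fun acc snr =>
      speed_order.foldl (fun acc speed =>
        let pattern := snr ++ "_" ++ speed ++ "_linear"
        let matching := domains.filter (fun d => PySem.Str.isIn pattern d)
        acc ++ PySem.List.sorted matching (fun x => x) false) acc) []
  let remaining := domains.filter (fun d => !(ordered_domains.contains d))
  ordered_domains ++ PySem.List.sorted remaining (fun x => x) false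

-- ===== PORT B =====
-- the comprehension 'patterns' of Source B
def pvAltPatterns : List String :=
  ["high_snr", "med_snr", "low_snr"].flatMap (fun snr =>
    ["slow", "med", "fast"].map (fun speed => snr ++ "_" ++ speed ++ "_linear"))

-- 'ranks = [i for i in range(len(patterns)) if patterns[i] in d]'
def pvRanks (d : String) : List Int :=
  (PySem.List.pyRange 0 (PySem.List.len pvAltPatterns) 1).filter
    (fun i => PySem.Str.isIn (PySem.List.pyGetD pvAltPatterns i "") d)

-- loop body of Source B: drop d into the bucket of every rank in (ranks or [9]);
-- ranks are enumerate/range indices, hence nonnegative, so .toNat is exact here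
def pvAltStep (bs : List (List String)) (d : String) : List (List String) :=
  let rs := if (pvRanks d).isEmpty then [(9 : Int)] else pvRanks d
  rs.foldl (fun bs r => bs.set r.toNat (bs.getD r.toNat [] ++ [d])) bs

def create_domain_order_alt (domains : List String) : List String :=
  let buckets : List (List String) := List.replicate 10 []
  let buckets := domains.foldl pvAltStep buckets
  buckets.flatMap (fun b => PySem.List.sorted b (fun x => x) false)

-- ===== PRECONDITION & SPEC =====
def Spec_create_domain_order (domains : List String) (out : List String) : Prop := out = create_domain_order_alt domains
instance (domains : List String) (out : List String) : Decidable (Spec_create_domain_order domains out) := by unfold Spec_create_domain_order; infer_instance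

-- ===== CLAIM (what is proved, stated in full; the proofs are below) =====
def Claim_equal_create_domain_order : Prop := ∀ (domains : List String), Dom_create_domain_order domains → Spec_create_domain_order domains (create_domain_order domains)

-- ===== LEMMAS AND PROOFS =====

-- the nine patterns, as literals
def pvPats : List String := ["high_snr_slow_linear", "high_snr_med_linear", "high_snr_fast_linear", "med_snr_slow_linear", "med_snr_med_linear", "med_snr_fast_linear", "low_snr_slow_linear", "low_snr_med_linear", "low_snr_fast_linear"]

lemma pvAltPatterns_eq : pvAltPatterns = pvPats := rfl

-- the Boolean deciding whether d lands in bucket i of B (bucket 9 = no pattern matches)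
def pvB (i : Nat) (d : String) : Bool :=
  if i < 9 then PySem.Str.isIn (pvPats.getD i "") d
  else !(pvPats.any (fun p => PySem.Str.isIn p d))

-- sorted([d for d in domains if p in d]), the building block of both sides
def pvS (domains : List String) (p : String) : List String :=
  PySem.List.sorted (domains.filter (fun d => PySem.Str.isIn p d)) (fun x => x) false

lemma pvGetD_set (v : List String) (bs : List (List String)) (n i : Nat) :
    (bs.set n v).getD i [] = if n = i ∧ n < bs.length then v else bs.getD i [] := by
  simp only [List.getD_eq_getElem?_getD, List.getElem?_set]
  split_ifs with h1 h2 h3 h4 <;> simp_all <;> omega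

lemma pvInnerFold (d : String) (i : Nat) :
    ∀ (rs : List Int) (bs : List (List String)),
      (rs.map Int.toNat).Nodup → (∀ r ∈ rs, 0 ≤ r ∧ r.toNat < bs.length) →
      (rs.foldl (fun bs r => bs.set r.toNat (bs.getD r.toNat [] ++ [d])) bs).getD i [] =
        bs.getD i [] ++ (if i ∈ rs.map Int.toNat then [d] else []) := by
  intro rs
  induction rs with
  | nil => intro bs _ _; simp
  | cons r rs ih =>
    intro bs hnd hb
    simp only [List.map_cons, List.nodup_cons] at hnd
    obtain ⟨hr, hnd⟩ := hnd
    have hrb := hb r (by simp)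
    simp only [List.foldl_cons]
    rw [ih _ hnd (fun x hx => ⟨(hb x (by simp [hx])).1, by rw [List.length_set]; exact (hb x (by simp [hx])).2⟩)]
    rw [pvGetD_set]
    by_cases hir : i = r.toNat
    · simp [hir, hrb.2, hr]
    · have : (r.toNat = i ∧ r.toNat < bs.length) = False := by simp; intro h; omega
      simp only [this, if_false]
      by_cases him : i ∈ rs.map Int.toNat <;> simp [him, List.mem_cons, hir]

lemma pvInnerFold_length (d : String) :
    ∀ (rs : List Int) (bs : List (List String)),
      (rs.foldl (fun bs r => bs.set r.toNat (bs.getD r.toNat [] ++ [d])) bs).length = bs.length := by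
  intro rs
  induction rs with
  | nil => intro bs; rfl
  | cons r rs ih => intro bs; rw [List.foldl_cons, ih, List.length_set]

lemma pvRanks_eq (d : String) :
    pvRanks d = ([0,1,2,3,4,5,6,7,8] : List Int).filter
      (fun i => PySem.Str.isIn (PySem.List.pyGetD pvPats i "") d) := by
  have h1 : PySem.List.len pvAltPatterns = 9 := by rfl
  have h2 : PySem.List.pyRange 0 9 1 = [0,1,2,3,4,5,6,7,8] := by decide
  rw [pvRanks, h1, h2, pvAltPatterns_eq]

lemma pvRanks_bound (d : String) : ∀ r ∈ pvRanks d, 0 ≤ r ∧ r.toNat < 9 := by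
  intro r hr
  rw [pvRanks_eq] at hr
  rcases List.mem_filter.1 hr with ⟨hm, _⟩
  fin_cases hm <;> simp

lemma pvRanks_nodup (d : String) : ((pvRanks d).map Int.toNat).Nodup := by
  rw [pvRanks_eq]
  apply List.Nodup.map_on
  · intro x hx y hy hxy
    rcases List.mem_filter.1 hx with ⟨hmx, _⟩
    rcases List.mem_filter.1 hy with ⟨hmy, _⟩
    fin_cases hmx <;> fin_cases hmy <;> simp_all
  · exact List.Nodup.filter _ (by decide)

lemma pvMem_ranks (d : String) (i : Nat) (hi : i < 9) :
    i ∈ (pvRanks d).map Int.toNat ↔ PySem.Str.isIn (pvPats.getD i "") d := by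
  rw [pvRanks_eq]
  constructor
  · rintro h
    rcases List.mem_map.1 h with ⟨r, hrm, hrt⟩
    rcases List.mem_filter.1 hrm with ⟨hm, hp⟩
    have h0 : 0 ≤ r := by fin_cases hm <;> simp
    have hri : r = (i : Int) := by omega
    rw [hri] at hp
    simpa [PySem.List.pyGetD_natCast] using hp
  · intro h
    refine List.mem_map.2 ⟨(i : Int), List.mem_filter.2 ⟨?_, ?_⟩, by simp⟩
    · simp only [List.mem_cons]; omega
    · simpa [PySem.List.pyGetD_natCast] using h

lemma pvRanks_nil_iff (d : String) :
    (pvRanks d).isEmpty = true ↔ pvPats.any (fun p => PySem.Str.isIn p d) = false := by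
  rw [pvRanks_eq, List.isEmpty_iff, List.filter_eq_nil_iff]
  simp only [List.mem_cons, List.not_mem_nil, or_false, forall_eq_or_imp, forall_eq,
    show PySem.List.pyGetD pvPats 0 "" = "high_snr_slow_linear" from rfl,
    show PySem.List.pyGetD pvPats 1 "" = "high_snr_med_linear" from rfl,
    show PySem.List.pyGetD pvPats 2 "" = "high_snr_fast_linear" from rfl,
    show PySem.List.pyGetD pvPats 3 "" = "med_snr_slow_linear" from rfl,
    show PySem.List.pyGetD pvPats 4 "" = "med_snr_med_linear" from rfl,
    show PySem.List.pyGetD pvPats 5 "" = "med_snr_fast_linear" from rfl,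
    show PySem.List.pyGetD pvPats 6 "" = "low_snr_slow_linear" from rfl,
    show PySem.List.pyGetD pvPats 7 "" = "low_snr_med_linear" from rfl,
    show PySem.List.pyGetD pvPats 8 "" = "low_snr_fast_linear" from rfl]
  simp only [pvPats, List.any_cons, List.any_nil]
  simp only [Bool.or_eq_false_iff]
  simp only [Bool.not_eq_true, and_true]

lemma pvStep_getD (bs : List (List String)) (d : String) (i : Nat)
    (h : bs.length = 10) (hi : i < 10) :
    (pvAltStep bs d).getD i [] = bs.getD i [] ++ (if pvB i d then [d] else []) := by
  unfold pvAltStep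
  by_cases he : (pvRanks d).isEmpty
  · simp only [he, if_true]
    rw [pvInnerFold d i [9] bs (by simp) (by simp [h])]
    have hany := (pvRanks_nil_iff d).1 he
    by_cases h9 : i = 9
    · subst h9
      have hb : pvB 9 d = true := by unfold pvB; rw [if_neg (by omega), hany]; rfl
      have hm : (9 : Nat) ∈ List.map Int.toNat [(9 : Int)] := by simp
      rw [hb, if_pos hm]; simp
    · have hlt : i < 9 := by omega
      have hnm : ¬ i ∈ (pvRanks d).map Int.toNat := by
        simp [List.isEmpty_iff.1 he]
      have hb : pvB i d = false := by
        unfold pvB; rw [if_pos hlt]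
        rcases Bool.eq_false_or_eq_true (PySem.Str.isIn (pvPats.getD i "") d) with ht | hf
        · exact absurd ((pvMem_ranks d i hlt).2 ht) hnm
        · exact hf
      have hm : ¬ i ∈ List.map Int.toNat [(9 : Int)] := by simp; omega
      rw [hb, if_neg hm]; rfl
  · simp only [Bool.not_eq_true] at he
    simp only [he, Bool.false_eq_true, if_false]
    rw [pvInnerFold d i (pvRanks d) bs (pvRanks_nodup d)
      (fun r hr => ⟨(pvRanks_bound d r hr).1, by have := (pvRanks_bound d r hr).2; omega⟩)]
    have hany : pvPats.any (fun p => PySem.Str.isIn p d) = true := by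
      rcases Bool.eq_false_or_eq_true (pvPats.any (fun p => PySem.Str.isIn p d)) with ht | hf
      · exact ht
      · exact absurd ((pvRanks_nil_iff d).2 hf) (by simp [he])
    by_cases h9 : i = 9
    · subst h9
      have hm : ¬ (9 : Nat) ∈ (pvRanks d).map Int.toNat := by
        intro hm; rcases List.mem_map.1 hm with ⟨r, hr, hrt⟩
        have := (pvRanks_bound d r hr).2; omega
      have hb : pvB 9 d = false := by unfold pvB; rw [if_neg (by omega), hany]; rfl
      rw [hb, if_neg hm]; rfl
    · have hlt : i < 9 := by omega
      have hb : pvB i d = PySem.Str.isIn (pvPats.getD i "") d := by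
        unfold pvB; rw [if_pos hlt]
      rw [hb]
      by_cases hs : PySem.Str.isIn (pvPats.getD i "") d
      · rw [if_pos ((pvMem_ranks d i hlt).2 hs), if_pos hs]
      · simp only [Bool.not_eq_true] at hs
        rw [if_neg (fun hm => by rw [(pvMem_ranks d i hlt).1 hm] at hs; cases hs)]
        simp only [hs, Bool.false_eq_true, if_false]

lemma pvStep_length (bs : List (List String)) (d : String) :
    (pvAltStep bs d).length = bs.length := by
  unfold pvAltStep; exact pvInnerFold_length d _ bs

lemma pvFoldl_length (domains : List String) :
    ∀ bs : List (List String), (domains.foldl pvAltStep bs).length = bs.length := by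
  induction domains with
  | nil => intro bs; rfl
  | cons d ds ih => intro bs; rw [List.foldl_cons, ih, pvStep_length]

lemma pvFoldl_getD (domains : List String) :
    ∀ bs : List (List String), bs.length = 10 → ∀ i : Nat, i < 10 →
      (domains.foldl pvAltStep bs).getD i [] = bs.getD i [] ++ domains.filter (fun d => pvB i d) := by
  induction domains with
  | nil => intro bs _ i _; simp
  | cons d ds ih =>
    intro bs h i hi
    simp only [List.foldl_cons, List.filter_cons]
    rw [ih (pvAltStep bs d) (by rw [pvStep_length, h]) i hi, pvStep_getD bs d i h hi]
    by_cases hb : pvB i d <;> simp [hb]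

lemma pvLen10 (bs : List (List String)) (h : bs.length = 10) :
    bs = [bs.getD 0 [], bs.getD 1 [], bs.getD 2 [], bs.getD 3 [], bs.getD 4 [],
          bs.getD 5 [], bs.getD 6 [], bs.getD 7 [], bs.getD 8 [], bs.getD 9 []] := by
  match bs, h with
  | [a0,a1,a2,a3,a4,a5,a6,a7,a8,a9], _ => rfl

lemma pvAlt_eq (domains : List String) :
    create_domain_order_alt domains =
      PySem.List.sorted (domains.filter (fun d => pvB 0 d)) (fun x => x) false ++
      PySem.List.sorted (domains.filter (fun d => pvB 1 d)) (fun x => x) false ++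
      PySem.List.sorted (domains.filter (fun d => pvB 2 d)) (fun x => x) false ++
      PySem.List.sorted (domains.filter (fun d => pvB 3 d)) (fun x => x) false ++
      PySem.List.sorted (domains.filter (fun d => pvB 4 d)) (fun x => x) false ++
      PySem.List.sorted (domains.filter (fun d => pvB 5 d)) (fun x => x) false ++
      PySem.List.sorted (domains.filter (fun d => pvB 6 d)) (fun x => x) false ++
      PySem.List.sorted (domains.filter (fun d => pvB 7 d)) (fun x => x) false ++
      PySem.List.sorted (domains.filter (fun d => pvB 8 d)) (fun x => x) false ++
      PySem.List.sorted (domains.filter (fun d => pvB 9 d)) (fun x => x) false := by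
  have halt : create_domain_order_alt domains =
      (domains.foldl pvAltStep (List.replicate 10 [])).flatMap
        (fun b => PySem.List.sorted b (fun x => x) false) := rfl
  rw [halt]
  have hF : (domains.foldl pvAltStep (List.replicate 10 [])).length = 10 := by
    rw [pvFoldl_length]; rfl
  have hg : ∀ i : Nat, i < 10 →
      (domains.foldl pvAltStep (List.replicate 10 [])).getD i [] = domains.filter (fun d => pvB i d) := by
    intro i hi
    rw [pvFoldl_getD domains _ (by rfl) i hi]
    have : (List.replicate 10 ([] : List String)).getD i [] = [] := by
      interval_cases i <;> rfl
    rw [this, List.nil_append]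
  rw [pvLen10 _ hF, hg 0 (by omega), hg 1 (by omega), hg 2 (by omega), hg 3 (by omega),
    hg 4 (by omega), hg 5 (by omega), hg 6 (by omega), hg 7 (by omega), hg 8 (by omega),
    hg 9 (by omega)]
  simp [List.append_assoc]

set_option maxHeartbeats 1000000 in
lemma pvA_canon (domains : List String) : create_domain_order domains =
    (pvS domains "high_snr_slow_linear" ++ pvS domains "high_snr_med_linear" ++
      pvS domains "high_snr_fast_linear" ++ pvS domains "med_snr_slow_linear" ++
      pvS domains "med_snr_med_linear" ++ pvS domains "med_snr_fast_linear" ++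
      pvS domains "low_snr_slow_linear" ++ pvS domains "low_snr_med_linear" ++
      pvS domains "low_snr_fast_linear") ++
    PySem.List.sorted (domains.filter (fun d =>
      !((pvS domains "high_snr_slow_linear" ++ pvS domains "high_snr_med_linear" ++
        pvS domains "high_snr_fast_linear" ++ pvS domains "med_snr_slow_linear" ++
        pvS domains "med_snr_med_linear" ++ pvS domains "med_snr_fast_linear" ++
        pvS domains "low_snr_slow_linear" ++ pvS domains "low_snr_med_linear" ++
        pvS domains "low_snr_fast_linear").contains d))) (fun x => x) false := by
  simp only [create_domain_order, List.foldl_cons, List.foldl_nil, pvS, List.nil_append,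
    List.append_assoc,
    show ("high_snr" ++ "_" ++ "slow" ++ "_linear" : String) = "high_snr_slow_linear" from rfl,
    show ("high_snr" ++ "_" ++ "med" ++ "_linear" : String) = "high_snr_med_linear" from rfl,
    show ("high_snr" ++ "_" ++ "fast" ++ "_linear" : String) = "high_snr_fast_linear" from rfl,
    show ("med_snr" ++ "_" ++ "slow" ++ "_linear" : String) = "med_snr_slow_linear" from rfl,
    show ("med_snr" ++ "_" ++ "med" ++ "_linear" : String) = "med_snr_med_linear" from rfl,
    show ("med_snr" ++ "_" ++ "fast" ++ "_linear" : String) = "med_snr_fast_linear" from rfl,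
    show ("low_snr" ++ "_" ++ "slow" ++ "_linear" : String) = "low_snr_slow_linear" from rfl,
    show ("low_snr" ++ "_" ++ "med" ++ "_linear" : String) = "low_snr_med_linear" from rfl,
    show ("low_snr" ++ "_" ++ "fast" ++ "_linear" : String) = "low_snr_fast_linear" from rfl]

set_option maxHeartbeats 1000000 in
lemma pvContains_ordered (domains : List String) (d : String) (hd : d ∈ domains) :
    (!((pvS domains "high_snr_slow_linear" ++ pvS domains "high_snr_med_linear" ++
        pvS domains "high_snr_fast_linear" ++ pvS domains "med_snr_slow_linear" ++
        pvS domains "med_snr_med_linear" ++ pvS domains "med_snr_fast_linear" ++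
        pvS domains "low_snr_slow_linear" ++ pvS domains "low_snr_med_linear" ++
        pvS domains "low_snr_fast_linear").contains d)) = pvB 9 d := by
  have h : ((pvS domains "high_snr_slow_linear" ++ pvS domains "high_snr_med_linear" ++
        pvS domains "high_snr_fast_linear" ++ pvS domains "med_snr_slow_linear" ++
        pvS domains "med_snr_med_linear" ++ pvS domains "med_snr_fast_linear" ++
        pvS domains "low_snr_slow_linear" ++ pvS domains "low_snr_med_linear" ++
        pvS domains "low_snr_fast_linear").contains d) = pvPats.any (fun p => PySem.Str.isIn p d) := by
    rw [Bool.eq_iff_iff]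
    simp only [List.contains_iff_mem, List.mem_append, pvS, PySem.List.mem_sorted,
      List.mem_filter, pvPats, List.any_cons, List.any_nil, Bool.or_eq_true, hd, true_and]
    simp only [or_assoc, Bool.false_eq_true, or_false]
  rw [h]
  unfold pvB
  rw [if_neg (by omega : ¬ (9 : Nat) < 9)]

set_option maxHeartbeats 1000000 in
lemma pvA_eq (domains : List String) :
    create_domain_order domains = create_domain_order_alt domains := by
  rw [pvA_canon, pvAlt_eq]
  rw [List.filter_congr (fun d hd => pvContains_ordered domains d hd)]
  simp only [pvS, List.append_assoc]
  rfl

-- ===== VERDICT (by name: the statement is the Claim_ definition above) =====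
theorem create_domain_order_spec : Claim_equal_create_domain_order := by
  intro domains _
  unfold Spec_create_domain_order
  exact pvA_eq domains
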